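-- pv_equiv track=rewrite | github.com/kootru-repo/kstar-verify | tier7-claims/cross_validate_lean.py | greedy_redist
-- ===== SOURCE A (Python) =====
-- from typing import Iterable, List, Tuple
--
-- def greedy_redist(c: List[int], a: List[int]) -> List[int]:
--     """Independent Python implementation of the Lean greedyRedist."""
--     out = []
--     excess = 0
--     for i, ci in enumerate(c):
--         cap = a[i] if i < len(a) else 0
--         avail = ci + excess
--         m = min(avail, cap)
--         excess = avail - m
--         out.append(m)
--     return out
-- ===== SOURCE B (Python) =====
-- def greedy_redist(c, a):
--     # Closed-form via prefix minima: with P_i = sum c[0..i], Q_i = sum caps[0..i],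
--     # the cumulative allocation is T_i = Q_i + min_{j=-1..i}(P_j - Q_j) (P_-1=Q_-1=0),
--     # maintained as a running minimum M; each output is T_i - T_{i-1}.
--     out = []
--     P = 0
--     Q = 0
--     M = 0
--     Tprev = 0
--     for i, ci in enumerate(c):
--         P += ci
--         Q += a[i] if i < len(a) else 0
--         M = min(M, P - Q)
--         T = Q + M
--         out.append(T - Tprev)
--         Tprev = T
--     return out
-- ===== Notes on version B (the rewrite author's own statement) =====
-- stated objective: alternative
-- what changed: Replaces the per-step greedy carry min(c_i+excess, cap_i) by the closed form T_i = Q_i + min_{j<=i}(P_j - Q_j) over the prefix sums P of c and Q of the caps, maintaining the prefix minimum M as a running value and emitting differences of consecutive cumulative totals; no excess variable and no per-element min against the cap.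
import Mathlib
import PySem

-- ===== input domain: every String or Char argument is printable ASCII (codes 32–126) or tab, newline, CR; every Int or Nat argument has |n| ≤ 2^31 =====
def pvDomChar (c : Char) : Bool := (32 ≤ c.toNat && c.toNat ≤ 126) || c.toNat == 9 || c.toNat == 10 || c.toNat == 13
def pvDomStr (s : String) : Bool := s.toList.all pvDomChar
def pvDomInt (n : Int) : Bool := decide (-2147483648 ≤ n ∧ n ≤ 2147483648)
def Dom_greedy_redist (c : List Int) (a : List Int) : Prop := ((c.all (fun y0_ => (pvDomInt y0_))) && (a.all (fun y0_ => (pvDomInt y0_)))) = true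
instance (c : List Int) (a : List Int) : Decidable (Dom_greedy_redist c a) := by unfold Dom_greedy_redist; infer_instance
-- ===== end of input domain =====

-- B replaces A's per-step excess carry by the prefix-minimum closed form T_i = Q_i + min_{j≤i}(P_j − Q_j); alternative formulation, same cost.


-- ===== PORT A =====
-- loop over enumerate(c) carrying the excess; cap = a[i] if i < len(a) else 0
def greedyA_go (a : List Int) : List Int → Nat → Int → List Int
  | [], _, _ => []
  | ci :: rest, i, excess =>
    let cap := if i < a.length then a.getD i 0 else 0
    let avail := ci + excess
    let m := min avail cap
    m :: greedyA_go a rest (i + 1) (avail - m)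

def greedy_redist (c : List Int) (a : List Int) : List Int :=
  greedyA_go a c 0 0

-- ===== PORT B =====
-- prefix sums P (of c) and Q (of caps), running prefix minimum M of P - Q (seeded with 0 for j = -1);
-- cumulative total T = Q + M, output is the difference of consecutive totals
def greedyB_go (a : List Int) : List Int → Nat → Int → Int → Int → Int → List Int
  | [], _, _, _, _, _ => []
  | ci :: rest, i, Tprev, P, Q, M =>
    let P' := P + ci
    let Q' := Q + (if i < a.length then a.getD i 0 else 0)
    let M' := min M (P' - Q')
    let T := Q' + M'
    (T - Tprev) :: greedyB_go a rest (i + 1) T P' Q' M'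

def greedy_redist_alt (c : List Int) (a : List Int) : List Int :=
  greedyB_go a c 0 0 0 0 0

-- ===== PRECONDITION & SPEC =====
def Spec_greedy_redist (c : List Int) (a : List Int) (out : List Int) : Prop := out = greedy_redist_alt c a
instance (c : List Int) (a : List Int) (out : List Int) : Decidable (Spec_greedy_redist c a out) := by unfold Spec_greedy_redist; infer_instance

-- ===== CLAIM =====
def Claim_equal_greedy_redist : Prop := ∀ (c : List Int) (a : List Int), Dom_greedy_redist c a → Spec_greedy_redist c a (greedy_redist c a)

-- ===== LEMMAS AND PROOFS =====

-- Invariant: A's excess equals P - Q - M, and B's Tprev equals Q + M.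
theorem greedy_go_eq (a : List Int) : ∀ (c : List Int) (i : Nat) (P Q M : Int),
    greedyA_go a c i (P - Q - M) = greedyB_go a c i (Q + M) P Q M := by
  intro c
  induction c with
  | nil => intro i P Q M; rfl
  | cons ci rest ih =>
    intro i P Q M
    simp only [greedyA_go, greedyB_go, List.cons.injEq]
    set cap := (if i < a.length then a.getD i 0 else 0) with hcap
    constructor
    · -- heads agree
      omega
    · -- tails agree via the induction hypothesis at the updated state
      have h := ih (i + 1) (P + ci) (Q + cap) (min M (P + ci - (Q + cap)))
      have he : ci + (P - Q - M) - min (ci + (P - Q - M)) cap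
          = P + ci - (Q + cap) - min M (P + ci - (Q + cap)) := by omega
      have hT : Q + cap + min M (P + ci - (Q + cap))
          = (Q + cap) + min M (P + ci - (Q + cap)) := by ring
      rw [he, hT]
      exact h

-- ===== VERDICT =====
theorem greedy_redist_spec : Claim_equal_greedy_redist := by
  intro c a _
  unfold Spec_greedy_redist greedy_redist greedy_redist_alt
  have h := greedy_go_eq a c 0 0 0 0
  simpa using h
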